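-- pv_equiv track=rewrite | github.com/TH-yi/microstate-analysis | src/microstate_analysis/eeg_tool/algorithm/clustering/microstate_seqeunce.py | conditions_tasks
-- ===== SOURCE A (Python) =====
-- def conditions_tasks(conditions, tasks):
--     res = {}
--     for condition in conditions:
--         res[condition] = []
--         for task in tasks:
--             if task.startswith(condition):
--                 res[condition].append(task)
--     return res
-- ===== SOURCE B (Python) =====
-- def conditions_tasks(conditions, tasks):
--     # One pass over the tasks: every prefix of a task is looked up in a hash
--     # map of conditions, instead of scanning all conditions per task.
--     res = {c: [] for c in conditions}
--     for task in tasks: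
--         for i in range(len(task) + 1):
--             p = task[:i]
--             if p in res:
--                 res[p].append(task)
--     return res
-- ===== Notes on version B (the rewrite author's own statement) =====
-- stated objective: faster
-- what changed: Instead of scanning every condition for every task (and rebuilding each bucket per condition), B builds the condition buckets once and makes a single pass over the tasks, hashing each prefix of a task into the bucket dict, so the inner scan over conditions disappears.
import Mathlib
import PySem

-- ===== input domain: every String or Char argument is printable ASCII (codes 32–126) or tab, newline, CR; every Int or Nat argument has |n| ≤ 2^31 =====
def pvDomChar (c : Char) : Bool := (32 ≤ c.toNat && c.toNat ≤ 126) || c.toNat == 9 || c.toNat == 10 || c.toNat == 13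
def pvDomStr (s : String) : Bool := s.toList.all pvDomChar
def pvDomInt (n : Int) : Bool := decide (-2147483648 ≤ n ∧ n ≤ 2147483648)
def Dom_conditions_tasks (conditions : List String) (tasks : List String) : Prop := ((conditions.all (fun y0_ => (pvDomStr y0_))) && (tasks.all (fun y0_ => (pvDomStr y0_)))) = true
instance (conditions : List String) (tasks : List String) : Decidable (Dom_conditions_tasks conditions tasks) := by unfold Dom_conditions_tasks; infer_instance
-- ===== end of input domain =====

-- B replaces A's per-condition scan of all tasks by one pass over the tasks that hashes
-- each prefix of a task into a pre-built dict of condition buckets (objective: faster).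

-- ===== PORT A =====
-- the body of A's inner 'for task in tasks' loop
def ctA_inner (condition : String) (res : PySem.Dict String (List String)) (task : String) :
    PySem.Dict String (List String) :=
  if PySem.Str.startswith task condition = true then
    res.modify condition [] (fun v => v ++ [task])
  else res

-- the body of A's outer 'for condition in conditions' loop (res[condition] = [] then the inner loop)
def ctA_step (tasks : List String) (res : PySem.Dict String (List String)) (condition : String) :
    PySem.Dict String (List String) :=
  tasks.foldl (ctA_inner condition) (res.insert condition [])

def conditions_tasks (conditions : List String) (tasks : List String) : List (String × List String) :=
  (conditions.foldl (ctA_step tasks) PySem.Dict.empty).items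

-- ===== PORT B =====
-- body of B's 'for i in range(len(task) + 1)' loop: p = task[:i]; if p in res: res[p].append(task)
def ctB_prefstep (task : String) (res : PySem.Dict String (List String)) (i : Int) :
    PySem.Dict String (List String) :=
  let p := PySem.Str.slice task none (some i)
  if res.contains p = true then res.modify p [] (fun v => v ++ [task]) else res

-- body of B's 'for task in tasks' loop
def ctB_taskstep (res : PySem.Dict String (List String)) (task : String) :
    PySem.Dict String (List String) :=
  (PySem.List.pyRange 0 (PySem.Str.len task + 1)).foldl (ctB_prefstep task) res

def conditions_tasks_alt (conditions : List String) (tasks : List String) : List (String × List String) :=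
  let res0 : PySem.Dict String (List String) :=
    conditions.foldl (fun d c => d.insert c []) PySem.Dict.empty
  (tasks.foldl ctB_taskstep res0).items

-- ===== PRECONDITION & SPEC =====
def Spec_conditions_tasks (conditions : List String) (tasks : List String) (out : List (String × List String)) : Prop := out = conditions_tasks_alt conditions tasks
instance (conditions : List String) (tasks : List String) (out : List (String × List String)) : Decidable (Spec_conditions_tasks conditions tasks out) := by unfold Spec_conditions_tasks; infer_instance

-- ===== CLAIM (what is proved, stated in full; the proofs are below) =====
def Claim_equal_conditions_tasks : Prop := ∀ (conditions : List String) (tasks : List String), Dom_conditions_tasks conditions tasks → Spec_conditions_tasks conditions tasks (conditions_tasks conditions tasks)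

-- ===== LEMMAS AND PROOFS =====

-- the list of prefixes of t, shortest first (proof-only)
def prefs (t : String) : List String :=
  (List.range (t.toList.length + 1)).map (fun k : Nat => PySem.Str.slice t none (some (k : Int)))

-- B's prefix step, viewed on the prefix string itself (proof-only)
def ctB_strstep (task : String) (res : PySem.Dict String (List String)) (p : String) :
    PySem.Dict String (List String) :=
  if res.contains p = true then res.modify p [] (fun v => v ++ [task]) else res

lemma toList_slice_take (t : String) (k : Nat) :
    (PySem.Str.slice t none (some (k : Int))).toList = t.toList.take k := by
  rw [PySem.Str.toList_slice, PySem.Chars.slice_eq_listSlice, PySem.List.slice_to_natCast]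

lemma mem_prefs (t x : String) : x ∈ prefs t ↔ PySem.Str.startswith t x = true := by
  rw [PySem.Str.startswith_eq, PySem.Chars.startswith, List.isPrefixOf_iff_prefix]
  constructor
  · intro hx
    obtain ⟨k, _, rfl⟩ := List.mem_map.mp hx
    rw [toList_slice_take]
    exact List.take_prefix _ _
  · intro h
    refine List.mem_map.mpr ⟨x.toList.length, ?_, ?_⟩
    · rw [List.mem_range]
      have := h.length_le
      omega
    · apply String.toList_inj.mp
      rw [toList_slice_take, ← List.prefix_iff_eq_take.mp h]

lemma nodup_prefs (t : String) : (prefs t).Nodup := by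
  refine List.Nodup.map_on ?_ List.nodup_range
  intro a ha b hb hab
  rw [List.mem_range] at ha hb
  have h := congrArg String.toList hab
  rw [toList_slice_take, toList_slice_take] at h
  have h1 := congrArg List.length h
  rw [List.length_take, List.length_take] at h1
  omega

-- ---- A side ----

lemma contains_modify_of_contains (d : PySem.Dict String (List String)) (c x : String)
    (f : List String → List String) (h : d.contains c = true) :
    (d.modify c [] f).contains x = d.contains x := by
  rw [PySem.Dict.contains_modify]
  by_cases hx : x = c
  · subst hx; simp [h]
  · simp [hx]

lemma keys_modify_of_contains (d : PySem.Dict String (List String)) (c : String)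
    (f : List String → List String) (h : d.contains c = true) :
    (d.modify c [] f).keys = d.keys := by
  rw [PySem.Dict.keys_modify, PySem.Dict.keys_insert_of_contains _ _ h]

lemma A_inner_keys (ts : List String) (c : String) (d : PySem.Dict String (List String))
    (h : d.contains c = true) :
    (ts.foldl (ctA_inner c) d).keys = d.keys := by
  induction ts generalizing d with
  | nil => rfl
  | cons t ts ih =>
    simp only [List.foldl_cons, ctA_inner]
    by_cases hs : PySem.Str.startswith t c = true
    · rw [if_pos hs, ih _ (by rw [contains_modify_of_contains _ _ _ _ h]; exact h)]
      exact keys_modify_of_contains _ _ _ h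
    · rw [if_neg hs, ih _ h]

lemma A_inner_getD (ts : List String) (c : String) (d : PySem.Dict String (List String)) (x : String) :
    (ts.foldl (ctA_inner c) d).getD x [] =
      if x = c then d.getD c [] ++ ts.filter (fun t => PySem.Str.startswith t c) else d.getD x [] := by
  induction ts generalizing d with
  | nil =>
    simp only [List.foldl_nil, List.filter_nil, List.append_nil]
    split
    · next h => subst h; rfl
    · rfl
  | cons t ts ih =>
    simp only [List.foldl_cons, ctA_inner, List.filter_cons]
    by_cases hs : PySem.Str.startswith t c = true
    · rw [if_pos hs, ih, if_pos hs]
      by_cases hx : x = c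
      · subst hx
        rw [if_pos rfl, if_pos rfl, PySem.Dict.getD_modify_self]
        simp
      · rw [if_neg hx, if_neg hx, PySem.Dict.getD_modify]
        rw [if_neg hx]
    · rw [if_neg hs, ih, if_neg hs]

lemma A_outer_getD (conds tasks : List String) (d : PySem.Dict String (List String)) (x : String) :
    (conds.foldl (ctA_step tasks) d).getD x [] =
      if x ∈ conds then tasks.filter (fun t => PySem.Str.startswith t x) else d.getD x [] := by
  induction conds generalizing d with
  | nil => simp
  | cons c cs ih =>
    simp only [List.foldl_cons, List.mem_cons]
    rw [ih]
    by_cases hcs : x ∈ cs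
    · simp [hcs]
    · rw [if_neg hcs]
      unfold ctA_step
      rw [A_inner_getD]
      by_cases hx : x = c
      · subst hx
        simp [PySem.Dict.getD_insert_self]
      · rw [if_neg hx, PySem.Dict.getD_insert, if_neg hx]
        simp [hx, hcs]

lemma keys_insert_eq_add (d : PySem.Dict String (List String)) (c : String) (v : List String) :
    (d.insert c v).keys = PySem.Set.add d.keys c := by
  by_cases h : d.contains c = true
  · rw [PySem.Dict.keys_insert_of_contains _ _ h, PySem.Set.add, if_pos]
    have : c ∈ d.keys := by simpa [PySem.Dict.contains_eq_decide_mem_keys] using h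
    simpa using this
  · rw [PySem.Dict.keys_insert_of_not_contains _ _ (by simpa using h), PySem.Set.add, if_neg]
    have : c ∉ d.keys := by
      intro hm
      exact h (by simp [PySem.Dict.contains_eq_decide_mem_keys, hm])
    simpa using this

lemma A_outer_keys (conds tasks : List String) (d : PySem.Dict String (List String)) :
    (conds.foldl (ctA_step tasks) d).keys = PySem.Set.update d.keys conds := by
  induction conds generalizing d with
  | nil => rfl
  | cons c cs ih =>
    simp only [List.foldl_cons, PySem.Set.update_cons]
    rw [ih, ctA_step, A_inner_keys _ _ _ (PySem.Dict.contains_insert_self _ _ _),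
      keys_insert_eq_add]

-- ---- B side ----

lemma res0_getD (conds : List String) (d : PySem.Dict String (List String)) (x : String)
    (h : d.getD x [] = []) :
    (conds.foldl (fun d c => d.insert c ([] : List String)) d).getD x [] = [] := by
  induction conds generalizing d with
  | nil => exact h
  | cons c cs ih =>
    simp only [List.foldl_cons]
    exact ih _ (by rw [PySem.Dict.getD_insert]; split <;> simp [h])

lemma strfold_contains (ps : List String) (t : String) (d : PySem.Dict String (List String)) (x : String) :
    (ps.foldl (ctB_strstep t) d).contains x = d.contains x := by
  induction ps generalizing d with
  | nil => rfl
  | cons p ps ih =>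
    simp only [List.foldl_cons, ctB_strstep]
    by_cases hc : d.contains p = true
    · rw [if_pos hc, ih, contains_modify_of_contains _ _ _ _ hc]
    · rw [if_neg hc, ih]

lemma strfold_keys (ps : List String) (t : String) (d : PySem.Dict String (List String)) :
    (ps.foldl (ctB_strstep t) d).keys = d.keys := by
  induction ps generalizing d with
  | nil => rfl
  | cons p ps ih =>
    simp only [List.foldl_cons, ctB_strstep]
    by_cases hc : d.contains p = true
    · rw [if_pos hc, ih, keys_modify_of_contains _ _ _ hc]
    · rw [if_neg hc, ih]

lemma strfold_getD (ps : List String) (t : String)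
    (d : PySem.Dict String (List String)) (x : String) (hnd : ps.Nodup) :
    (ps.foldl (ctB_strstep t) d).getD x [] =
      if x ∈ ps ∧ d.contains x = true then d.getD x [] ++ [t] else d.getD x [] := by
  induction ps generalizing d with
  | nil => simp
  | cons p ps ih =>
    obtain ⟨hp, hnd'⟩ := List.nodup_cons.mp hnd
    simp only [List.foldl_cons, ctB_strstep, List.mem_cons]
    by_cases hc : d.contains p = true
    · rw [if_pos hc, ih _ hnd']
      by_cases hx : x = p
      · subst hx
        rw [contains_modify_of_contains _ _ _ _ hc, if_neg (by simp [hp]),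
          PySem.Dict.getD_modify_self]
        simp [hc]
      · rw [contains_modify_of_contains _ _ _ _ hc, PySem.Dict.getD_modify, if_neg hx]
        by_cases hmem : x ∈ ps <;> simp [hx, hmem]
    · rw [if_neg hc, ih _ hnd']
      by_cases hx : x = p
      · subst hx
        simp [hc, hp]
      · simp [hx]

lemma taskstep_eq_prefs (d : PySem.Dict String (List String)) (t : String) :
    ctB_taskstep d t = (prefs t).foldl (ctB_strstep t) d := by
  have h1 : PySem.List.pyRange 0 (PySem.Str.len t + 1)
      = (List.range (t.toList.length + 1)).map (fun k : Nat => (k : Int)) := by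
    rw [PySem.List.pyRange_one]
    have h2 : (PySem.Str.len t + 1 - 0).toNat = t.toList.length + 1 := by
      simp [PySem.Str.len]
    rw [h2]
    refine List.map_congr_left ?_
    intro k _
    simp
  rw [ctB_taskstep, h1, List.foldl_map, prefs, List.foldl_map]
  rfl

lemma B_taskstep_contains (d : PySem.Dict String (List String)) (t x : String) :
    (ctB_taskstep d t).contains x = d.contains x := by
  rw [taskstep_eq_prefs, strfold_contains]

lemma B_taskstep_keys (d : PySem.Dict String (List String)) (t : String) :
    (ctB_taskstep d t).keys = d.keys := by
  rw [taskstep_eq_prefs, strfold_keys]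

lemma B_taskstep_getD (d : PySem.Dict String (List String)) (t x : String) :
    (ctB_taskstep d t).getD x [] =
      if PySem.Str.startswith t x = true ∧ d.contains x = true then d.getD x [] ++ [t]
      else d.getD x [] := by
  rw [taskstep_eq_prefs, strfold_getD _ _ _ _ (nodup_prefs t)]
  simp [mem_prefs]

lemma B_outer_getD (ts : List String) (d : PySem.Dict String (List String)) (x : String) :
    (ts.foldl ctB_taskstep d).getD x [] =
      d.getD x [] ++
        (if d.contains x = true then ts.filter (fun t => PySem.Str.startswith t x) else []) := by
  induction ts generalizing d with
  | nil => simp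
  | cons t ts ih =>
    simp only [List.foldl_cons, List.filter_cons]
    rw [ih, B_taskstep_getD, B_taskstep_contains]
    by_cases hc : d.contains x = true
    · by_cases hs : PySem.Chars.startswith t.toList x.toList = true
      · simp [PySem.Str.startswith_eq, hc, hs, List.append_assoc]
      · simp [PySem.Str.startswith_eq, hc, hs]
    · simp [hc]

lemma B_outer_keys (ts : List String) (d : PySem.Dict String (List String)) :
    (ts.foldl ctB_taskstep d).keys = d.keys := by
  induction ts generalizing d with
  | nil => rfl
  | cons t ts ih => rw [List.foldl_cons, ih, B_taskstep_keys]

-- ===== VERDICT (by name: the statement is the Claim_ definition above) =====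
theorem conditions_tasks_spec : Claim_equal_conditions_tasks := by
  intro conditions tasks _
  unfold Spec_conditions_tasks conditions_tasks conditions_tasks_alt
  set dA := conditions.foldl (ctA_step tasks) PySem.Dict.empty with hdA
  set res0 := conditions.foldl (fun d c => d.insert c ([] : List String)) PySem.Dict.empty with hres0
  set dB := tasks.foldl ctB_taskstep res0 with hdB
  have hkA : dA.keys = PySem.Set.ofList conditions := by
    rw [hdA, A_outer_keys, PySem.Dict.keys_empty, PySem.Set.update_nil_left]
  have hk0 : res0.keys = PySem.Set.ofList conditions := by
    rw [hres0, PySem.Dict.keys_foldl_insert, PySem.Dict.keys_empty, PySem.Set.update_nil_left]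
  have hkB : dB.keys = PySem.Set.ofList conditions := by rw [hdB, B_outer_keys, hk0]
  have hndA : dA.keys.Nodup := by rw [hkA]; exact PySem.Set.nodup_ofList _
  have hndB : dB.keys.Nodup := by rw [hkB]; exact PySem.Set.nodup_ofList _
  rw [PySem.Dict.items_eq_map_keys dA hndA [], PySem.Dict.items_eq_map_keys dB hndB [], hkA, hkB]
  apply List.map_congr_left
  intro k hk
  have hkmem : k ∈ conditions := (PySem.Set.mem_ofList _ _).mp hk
  have h1 : dA.getD k [] = tasks.filter (fun t => PySem.Str.startswith t k) := by
    rw [hdA, A_outer_getD, if_pos hkmem]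
  have hc0 : res0.contains k = true := by
    rw [PySem.Dict.contains_eq_decide_mem_keys, hk0]
    simpa using hk
  have h2 : dB.getD k [] = tasks.filter (fun t => PySem.Str.startswith t k) := by
    have hr0 : res0.getD k [] = [] := by
      rw [hres0]
      exact res0_getD _ _ _ (PySem.Dict.getD_empty _ _)
    rw [hdB, B_outer_getD, if_pos hc0, hr0, List.nil_append]
  rw [h1, h2]
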